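-- pv_equiv track=rewrite | github.com/jorenvandeweyer/Python_SudokuSolver | sudoku.py | blockPossibilities
-- ===== SOURCE A (Python) =====
-- def blockPossibilities(matrix, row, column, numbers):
-- 	blockRow = createBlockRange(row // 3)
-- 	blockColumn = createBlockRange(column // 3)
--
-- 	current = []
--
-- 	for i in blockRow:
-- 		for j in blockColumn:
-- 			if matrix[i][j] != 0:
-- 				current.append(matrix[i][j])
--
-- 	for i in numbers[:]:
-- 		if i in current:
-- 			numbers.remove(i)
-- 	else:
-- 		return numbers
--
-- def createBlockRange(current):
--
-- 	return range(current * 3, current * 3 + 3)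
-- ===== SOURCE B (Python) =====
-- def blockPossibilities(matrix, row, column, numbers):
-- 	for i in createBlockRange(row // 3):
-- 		for j in createBlockRange(column // 3):
-- 			v = matrix[i][j]
-- 			if v != 0:
-- 				numbers[:] = [x for x in numbers if x != v]
-- 	return numbers
--
-- def createBlockRange(current):
--
-- 	return range(current * 3, current * 3 + 3)
-- ===== Notes on version B (the rewrite author's own statement) =====
-- stated objective: simpler
-- what changed: Fuses A's two phases (collect block values into an intermediate 'current' list, then filter numbers against it) into a single block-driven pass that, for each non-zero cell value, strips all its occurrences from numbers directly; no intermediate list, no second scan of a copy of numbers.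
import Mathlib
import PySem

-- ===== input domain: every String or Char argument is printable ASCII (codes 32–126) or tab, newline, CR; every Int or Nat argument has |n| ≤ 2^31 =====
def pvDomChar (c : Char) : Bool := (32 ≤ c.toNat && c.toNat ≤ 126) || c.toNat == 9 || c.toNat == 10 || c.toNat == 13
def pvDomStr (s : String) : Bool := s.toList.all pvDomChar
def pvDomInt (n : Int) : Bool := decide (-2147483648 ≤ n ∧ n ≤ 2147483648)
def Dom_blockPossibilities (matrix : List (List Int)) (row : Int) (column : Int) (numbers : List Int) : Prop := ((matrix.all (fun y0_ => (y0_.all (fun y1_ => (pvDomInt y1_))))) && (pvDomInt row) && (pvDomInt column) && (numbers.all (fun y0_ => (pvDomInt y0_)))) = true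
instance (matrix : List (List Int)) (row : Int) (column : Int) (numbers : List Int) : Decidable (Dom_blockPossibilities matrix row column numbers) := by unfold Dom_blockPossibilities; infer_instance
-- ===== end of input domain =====

-- B fuses A's collect-then-filter into one block-driven removal pass; return value proved
-- equal; both Pythons also mutate `numbers` in place to the same final contents.


-- ===== PORT A =====
def createBlockRange (current : Int) : List Int :=
  PySem.List.pyRange (current * 3) (current * 3 + 3) 1

def blockPossibilities (matrix : List (List Int)) (row : Int) (column : Int) (numbers : List Int) : List Int :=
  let blockRow := createBlockRange (PySem.Int.floordiv row 3)
  let blockColumn := createBlockRange (PySem.Int.floordiv column 3)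
  let current : List Int := blockRow.foldl (fun cur i =>
    blockColumn.foldl (fun cur j =>
      if PySem.List.pyGetD (PySem.List.pyGetD matrix i []) j 0 ≠ 0
      then cur ++ [PySem.List.pyGetD (PySem.List.pyGetD matrix i []) j 0]
      else cur) cur) []
  numbers.foldl (fun ns i =>
    if i ∈ current then (PySem.List.remove? ns i).getD ns else ns) numbers

-- ===== PORT B =====
def blockPossibilities_alt (matrix : List (List Int)) (row : Int) (column : Int) (numbers : List Int) : List Int :=
  (createBlockRange (PySem.Int.floordiv row 3)).foldl (fun ns i =>
    (createBlockRange (PySem.Int.floordiv column 3)).foldl (fun ns j =>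
      let v := PySem.List.pyGetD (PySem.List.pyGetD matrix i []) j 0
      if v ≠ 0 then ns.filter (fun x => decide (x ≠ v)) else ns) ns) numbers

-- ===== PRECONDITION & SPEC =====
-- Pre_ = exactly the inputs where A returns: every block index pair is a valid
-- (possibly negative, Python-style) index into matrix and its row; otherwise A raises IndexError.
def Pre_blockPossibilities (matrix : List (List Int)) (row : Int) (column : Int) (numbers : List Int) : Prop :=
  ∀ i ∈ createBlockRange (PySem.Int.floordiv row 3),
    PySem.Raise.InRange matrix.length i ∧
    ∀ j ∈ createBlockRange (PySem.Int.floordiv column 3),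
      PySem.Raise.InRange (PySem.List.pyGetD matrix i []).length j

instance (matrix : List (List Int)) (row : Int) (column : Int) (numbers : List Int) : Decidable (Pre_blockPossibilities matrix row column numbers) := by
  unfold Pre_blockPossibilities; infer_instance

def pvWitness_blockPossibilities : List (List Int) × Int × Int × List Int :=
  ([[0,1,0],[2,0,0],[0,0,3]], 0, 0, [1,2,3,4])

def Spec_blockPossibilities (matrix : List (List Int)) (row : Int) (column : Int) (numbers : List Int) (out : List Int) : Prop := out = blockPossibilities_alt matrix row column numbers
instance (matrix : List (List Int)) (row : Int) (column : Int) (numbers : List Int) (out : List Int) : Decidable (Spec_blockPossibilities matrix row column numbers out) := by unfold Spec_blockPossibilities; infer_instance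

-- ===== CLAIM (what is proved, stated in full; the proofs are below) =====
def Claim_equal_blockPossibilities : Prop := ∀ (matrix : List (List Int)) (row : Int) (column : Int) (numbers : List Int), Dom_blockPossibilities matrix row column numbers → Pre_blockPossibilities matrix row column numbers → Spec_blockPossibilities matrix row column numbers (blockPossibilities matrix row column numbers)

-- ===== LEMMAS AND PROOFS =====

-- A's collect loop builds exactly the non-zero cell values of the block, in traversal order.
lemma collect_eq (val : Int → Int → Int) (R C : List Int) (init : List Int) :
    R.foldl (fun cur i =>
      C.foldl (fun cur j => if val i j ≠ 0 then cur ++ [val i j] else cur) cur) init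
    = init ++ (R.flatMap (fun i => C.map (val i))).filter (fun v => decide (v ≠ 0)) := by
  induction R generalizing init with
  | nil => simp
  | cons i R ih =>
    simp only [List.foldl_cons, List.flatMap_cons, List.filter_append, ih]
    rw [PySem.List.foldl_append_ite (p := fun j => val i j ≠ 0) (f := fun j => val i j) (l := C) (acc := init)]
    rw [List.append_assoc,
      show (fun x => decide (val i x ≠ 0)) = ((fun v => decide (v ≠ 0)) ∘ (fun j => val i j)) from rfl,
      ← List.filter_map]

-- first-occurrence removal past a prefix that does not contain the value
lemma remove?_append_cons (pre xs : List Int) (i : Int) (h : i ∉ pre) :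
    PySem.List.remove? (pre ++ i :: xs) i = some (pre ++ xs) := by
  induction pre with
  | nil => simp
  | cons a pre ih =>
    have ha : a ≠ i := fun e => h (e ▸ List.mem_cons_self)
    rw [List.cons_append, PySem.List.remove?_cons_of_ne _ ha,
        ih (fun hm => h (List.mem_cons_of_mem _ hm))]
    rfl

-- A's second loop (over a copy of numbers, removing members of `cur`) is a filter.
lemma removePass (cur : List Int) (xs pre : List Int) (h : ∀ a ∈ pre, a ∉ cur) :
    xs.foldl (fun ns i => if i ∈ cur then (PySem.List.remove? ns i).getD ns else ns) (pre ++ xs)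
    = pre ++ xs.filter (fun x => decide (x ∉ cur)) := by
  induction xs generalizing pre with
  | nil => simp
  | cons i xs ih =>
    simp only [List.foldl_cons]
    by_cases hi : i ∈ cur
    · have hip : i ∉ pre := fun hm => h i hm hi
      rw [if_pos hi, remove?_append_cons pre xs i hip]
      simp only [Option.getD_some]
      rw [ih pre h]
      simp [hi]
    · rw [if_neg hi]
      have : pre ++ i :: xs = (pre ++ [i]) ++ xs := by simp
      rw [this, ih (pre ++ [i]) (by
        intro a ha
        rcases List.mem_append.1 ha with h1 | h1
        · exact h a h1
        · simp at h1; subst h1; exact hi)]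
      simp [hi]

-- B's fused pass over the block cells is the same filter.
lemma stripPass (cells ns : List Int) :
    cells.foldl (fun ns v => if v ≠ 0 then ns.filter (fun x => decide (x ≠ v)) else ns) ns
    = ns.filter (fun x => decide (x ∉ cells.filter (fun v => decide (v ≠ 0)))) := by
  induction cells generalizing ns with
  | nil => simp
  | cons v cs ih =>
    simp only [List.foldl_cons]
    by_cases hv : v = 0
    · rw [if_neg (by simp [hv]), ih]
      simp [hv]
    · rw [if_pos hv, ih, List.filter_filter]
      refine List.filter_congr ?_
      intro x _
      cases hxv : decide (x = v) <;> cases hxc : decide (x ∈ cs) <;> simp_all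

-- B's nested fold over rows/columns equals the single fold over the flattened cell list.
lemma nested_eq_cells (val : Int → Int → Int) (R C : List Int) (ns : List Int) :
    R.foldl (fun ns i =>
      C.foldl (fun ns j =>
        let v := val i j
        if v ≠ 0 then ns.filter (fun x => decide (x ≠ v)) else ns) ns) ns
    = (R.flatMap (fun i => C.map (val i))).foldl
        (fun ns v => if v ≠ 0 then ns.filter (fun x => decide (x ≠ v)) else ns) ns := by
  induction R generalizing ns with
  | nil => simp
  | cons i R ih =>
    simp only [List.foldl_cons, List.flatMap_cons, List.foldl_append, List.foldl_map]
    exact ih _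

-- ===== VERDICT (by name: the statement is the Claim_ definition above) =====
theorem blockPossibilities_spec : Claim_equal_blockPossibilities := by
  intro matrix row column numbers _ _
  unfold Spec_blockPossibilities blockPossibilities blockPossibilities_alt
  set val : Int → Int → Int := fun i j => PySem.List.pyGetD (PySem.List.pyGetD matrix i []) j 0 with hval
  set R := createBlockRange (PySem.Int.floordiv row 3)
  set C := createBlockRange (PySem.Int.floordiv column 3)
  simp only []
  rw [collect_eq val R C []]
  rw [nested_eq_cells val R C numbers, stripPass]
  have h := removePass ((R.flatMap (fun i => C.map (val i))).filter (fun v => decide (v ≠ 0)))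
      numbers [] (by simp)
  simp only [List.nil_append] at h
  exact h
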